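-- pv_equiv track=rewrite | github.com/S-vani/CSC108 | LABS/lab5.py | sum_string
-- ===== SOURCE A (Python) =====
-- def sum_string(string: str) -> int:
--     """
--     Given a string <string>, return the sum of this string, as computed by the
--     formula given below:
--
--     To compute the sum of a string as defined by this function, we add every
--     odd positioned digit, and subtract every even positioned digit. For example,
--     if we had an input of "54321", we would add 5, subtract 4, add 3, subtract
--     2, and add 1, bringing us to a total of 3. In other words, you would add the
--     first digit, subtract the second digit, and keep alternating until you reach
--     the end of the string. If the string is empty, then the sum is 0.
--
--     Note: since we give the input as a string, you will have to do some type
--     conversion in order to solve this problem.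
--
--     Precondition: <string> will only contain the characters 0-9.
--
--     >>> sum_string("12345")
--     3
--     >>> sum_string("54321")
--     3
--     >>> sum_string("5242")
--     5
--     """
--     total = 0
--     if len(string) == 0:
--         return 0
--
--     for i in range(len(string)):
--         if i % 2 == 0:
--             total += int(string[i])
--         else:
--             total -= int(string[i])
--     return total
-- ===== SOURCE B (Python) =====
-- def sum_string(string: str) -> int:
--     evens = string[::2]
--     odds = string[1::2]
--     return sum(int(c) for c in evens) - sum(int(c) for c in odds)
-- ===== Notes on version B (the rewrite author's own statement) =====
-- stated objective: simpler
-- what changed: B replaces A's indexed loop with a per-index parity branch by a partition-then-sum decomposition: slice the even-positioned and odd-positioned characters (string[::2], string[1::2]), sum each group, and subtract; the empty-string guard disappears.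
import Mathlib
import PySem

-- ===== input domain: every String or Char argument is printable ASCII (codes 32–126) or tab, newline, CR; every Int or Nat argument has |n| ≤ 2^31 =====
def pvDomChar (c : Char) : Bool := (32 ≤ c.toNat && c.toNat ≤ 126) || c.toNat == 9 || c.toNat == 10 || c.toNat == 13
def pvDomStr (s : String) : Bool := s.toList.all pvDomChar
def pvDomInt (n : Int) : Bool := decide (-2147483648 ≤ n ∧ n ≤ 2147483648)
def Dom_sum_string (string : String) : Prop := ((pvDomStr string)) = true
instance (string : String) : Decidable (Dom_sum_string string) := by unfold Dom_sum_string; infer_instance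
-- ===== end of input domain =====

-- B sums the even-positioned slice and the odd-positioned slice separately and subtracts,
-- instead of A's single indexed loop with a parity branch: simpler, no index arithmetic.

-- ===== PORT A =====
-- int(c) for a single character; under Pre_ the character is a digit, so the Option is some
def pvInt1 (c : Char) : Int := (PySem.Int.ofChars? [c]).getD 0

def sum_string (string : String) : Int :=
  if PySem.Str.len string = 0 then 0
  else
    (PySem.List.pyRange 0 (PySem.Str.len string) 1).foldl
      (fun total i =>
        if i % 2 == 0 then total + pvInt1 (PySem.List.pyGetD string.toList i ' ')
        else total - pvInt1 (PySem.List.pyGetD string.toList i ' ')) 0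

-- ===== PORT B =====
def sum_string_alt (string : String) : Int :=
  let evens := (PySem.List.slice? string.toList none none 2).getD []
  let odds := (PySem.List.slice? string.toList (some 1) none 2).getD []
  (evens.map pvInt1).sum - (odds.map pvInt1).sum

-- ===== PRECONDITION & SPEC =====
-- Pre_ excludes strings containing a non-digit character: there int(string[i]) raises ValueError in A.
def Pre_sum_string (string : String) : Prop := string.toList.all PySem.Chars.isdigit = true
instance (string : String) : Decidable (Pre_sum_string string) := by unfold Pre_sum_string; infer_instance
def pvWitness_sum_string : String := "54321"

def Spec_sum_string (string : String) (out : Int) : Prop := out = sum_string_alt string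
instance (string : String) (out : Int) : Decidable (Spec_sum_string string out) := by unfold Spec_sum_string; infer_instance

-- ===== CLAIM (what is proved, stated in full; the proofs are below) =====
def Claim_equal_sum_string : Prop := ∀ (string : String), Dom_sum_string string → Pre_sum_string string → Spec_sum_string string (sum_string string)

-- ===== LEMMAS AND PROOFS =====

-- alternating sum: add head, flip sign for the tail
def pvAsum : List Char → Int
  | [] => 0
  | c :: t => pvInt1 c - pvAsum t

-- every second element starting at position 0 (true) / 1 (false)
def pvAlt2 : Bool → List Char → List Char
  | _, [] => []
  | true, c :: t => c :: pvAlt2 false t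
  | false, _ :: t => pvAlt2 true t

theorem pvCoreE : (xs : List Char) →
    (List.range ((xs.length + 1) / 2)).filterMap (fun k => xs[2 * k]?) = pvAlt2 true xs
  | [] => by simp [pvAlt2]
  | [a] => by simp [pvAlt2]
  | a :: b :: t => by
      have ih := pvCoreE t
      have hlen : ((a :: b :: t).length + 1) / 2 = (t.length + 1) / 2 + 1 := by
        simp [List.length_cons]; omega
      rw [hlen, List.range_succ_eq_map, List.filterMap_cons]
      simp only [List.filterMap_map]
      have hf : (fun k => (a :: b :: t)[2 * (k + 1)]?) = (fun k => t[2 * k]?) := by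
        funext k
        have h2 : 2 * (k + 1) = 2 * k + 1 + 1 := by omega
        rw [h2]; simp
      simp only [Function.comp_def, Nat.succ_eq_add_one]
      rw [hf, ih]
      simp [pvAlt2]

theorem pvSliceE (xs : List Char) : PySem.List.slice? xs none none 2 =
    some ((List.range ((xs.length + 1) / 2)).filterMap (fun k => xs[2 * k]?)) := by
  simp only [PySem.List.slice?, PySem.List.sliceIndices]
  norm_num
  have h1 : (if 0 < xs.length then (((xs.length : Int) + 2 - 1) / 2).toNat else 0)
      = (xs.length + 1) / 2 := by split <;> omega
  have h2 : ∀ x : Nat, ((2 : Int) * (x : Int)).toNat = 2 * x := fun x => by omega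
  rw [h1]
  simp only [h2]

theorem pvAlt2_false_eq (xs : List Char) : pvAlt2 false xs = pvAlt2 true (xs.drop 1) := by
  cases xs <;> simp [pvAlt2]

theorem pvSliceO (xs : List Char) : PySem.List.slice? xs (some 1) none 2 =
    some (pvAlt2 false xs) := by
  have step1 : PySem.List.slice? xs (some 1) none 2 =
      some ((List.range (xs.length / 2)).filterMap (fun k => xs[2 * k + 1]?)) := by
    simp only [PySem.List.slice?, PySem.List.sliceIndices]
    norm_num
    rcases Nat.eq_zero_or_pos xs.length with h | h
    · simp [h]
    · have hm : min (1 : Int) (xs.length : Int) = 1 := by omega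
      rw [hm]
      have h1 : (if 1 < xs.length then (((xs.length : Int) - 1 + 2 - 1) / 2).toNat else 0)
          = xs.length / 2 := by split <;> omega
      rw [h1]
      have h2 : ∀ x : Nat, ((1 : Int) + 2 * (x : Int)).toNat = 2 * x + 1 := fun x => by omega
      simp only [h2]
  rw [step1, pvAlt2_false_eq, ← pvCoreE (xs.drop 1)]
  have hl : ((xs.drop 1).length + 1) / 2 = xs.length / 2 := by
    rcases xs with _ | ⟨a, t⟩ <;> simp
  have hf : (fun k => (xs.drop 1)[2 * k]?) = (fun k => xs[2 * k + 1]?) := by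
    funext k
    rw [List.getElem?_drop]
    congr 1
    omega
  rw [hl, hf]

theorem pvFoldA (l : List Char) : ∀ (k acc : Int),
    (PySem.List.enumerate l k).foldl
      (fun t (p : Int × Char) => if p.1 % 2 == 0 then t + pvInt1 p.2 else t - pvInt1 p.2) acc
    = acc + (if k % 2 = 0 then pvAsum l else -pvAsum l) := by
  induction l with
  | nil => intro k acc; simp [PySem.List.enumerate, pvAsum]
  | cons c t ih =>
      intro k acc
      rw [PySem.List.enumerate_cons, List.foldl_cons, ih (k + 1)]
      by_cases h : k % 2 = 0
      · have h1 : ¬ (k + 1) % 2 = 0 := by omega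
        have hb : (k % 2 == 0) = true := by simpa using h
        rw [hb, if_pos rfl, if_neg h1, if_pos h, pvAsum]
        ring
      · have h1 : (k + 1) % 2 = 0 := by omega
        have hb : (k % 2 == 0) = false := by simpa using h
        rw [hb, if_neg (by simp), if_pos h1, if_neg h, pvAsum]
        ring

theorem pvA_eq_asum (s : String) : sum_string s = pvAsum s.toList := by
  unfold sum_string
  by_cases h0 : PySem.Str.len s = 0
  · rw [if_pos h0]
    have : s.toList = [] := by
      have := h0
      simp [PySem.Str.len] at this
      simpa using this
    simp [this, pvAsum]
  · rw [if_neg h0]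
    have hlen : PySem.Str.len s = PySem.List.len s.toList := by
      simp [PySem.Str.len, PySem.List.len]
    rw [hlen]
    have key := pvFoldA s.toList 0 0
    rw [PySem.List.enumerate_eq_map_pyRange s.toList ' ', List.foldl_map] at key
    simpa using key

theorem pvB_eq (s : String) : sum_string_alt s =
    ((pvAlt2 true s.toList).map pvInt1).sum - ((pvAlt2 false s.toList).map pvInt1).sum := by
  unfold sum_string_alt
  rw [pvSliceE, pvSliceO, pvCoreE]
  rfl

theorem pvAsum_eq (l : List Char) :
    pvAsum l = ((pvAlt2 true l).map pvInt1).sum - ((pvAlt2 false l).map pvInt1).sum := by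
  induction l with
  | nil => simp [pvAsum, pvAlt2]
  | cons c t ih => simp [pvAsum, pvAlt2, ih]; ring

-- ===== VERDICT (by name: the statement is the Claim_ definition above) =====
theorem sum_string_spec : Claim_equal_sum_string := by
  intro s _ _
  unfold Spec_sum_string
  rw [pvA_eq_asum, pvB_eq, pvAsum_eq]
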